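-- pv_equiv track=rewrite | github.com/vyklyuk/AI_Course_Creator | CaseStudyLectureAgent.py | _extract_headered_json
-- ===== SOURCE A (Python) =====
-- SECTION_HEADERS = {
--     "Learning Outcomes:",
--     "Case Overview:",
--     "Context & Timeline:",
--     "Data Exhibits:",
--     "Guiding Questions (Before Analysis):",
--     "Analysis Walkthrough:",
--     "Decision Points:",
--     "Instructor Notes (Model Answers):",
--     "Wrap-Up & Transfer:",
--     "Reflection Prompt:",
-- }
--
-- def _extract_headered_json(text: str) -> dict:
--     """
--     Build a JSON dict whose keys mirror HEADER_PREFIXES and SECTION_HEADERS.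
--     - HEADER_PREFIXES entries take the single-line value after "Label: ..."
--     - SECTION_HEADERS entries accumulate lines after the header until the next header.
--     Missing keys are included with "".
--     """
--     prefixes = list(HEADER_PREFIXES)
--     sections = list(SECTION_HEADERS)
--     result = {k: "" for k in prefixes}
--     result.update({k: "" for k in sections})
--     lines = [ln.rstrip("\n") for ln in text.splitlines()]
--
--     # Prefix lines (single-line values)
--     for ln in lines:
--         s = ln.strip()
--         for pref in prefixes:
--             if s.startswith(pref):
--                 val = s[len(pref):].strip()
--                 if val.startswith(":"):
--                     val = val[1:].strip()
--                 result[pref] = val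
--                 break
--
--     # Section blocks
--     indices = []
--     set_sections = set(sections)
--     for idx, ln in enumerate(lines):
--         s = ln.strip()
--         if s in set_sections:
--             indices.append((idx, s))
--
--     for i, (start_idx, header) in enumerate(indices):
--         end_idx = indices[i+1][0] if i+1 < len(indices) else len(lines)
--         block = lines[start_idx+1:end_idx]
--         while block and not block[0].strip():
--             block = block[1:]
--         while block and not block[-1].strip():
--             block = block[:-1]
--         result[header] = "\n".join(block).strip()
--
--     return result
--
-- HEADER_PREFIXES = ("Title:", "Course:", "Module:", "Duration:")
-- ===== SOURCE B (Python) =====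
-- SECTION_HEADERS = {
--     "Learning Outcomes:",
--     "Case Overview:",
--     "Context & Timeline:",
--     "Data Exhibits:",
--     "Guiding Questions (Before Analysis):",
--     "Analysis Walkthrough:",
--     "Decision Points:",
--     "Instructor Notes (Model Answers):",
--     "Wrap-Up & Transfer:",
--     "Reflection Prompt:",
-- }
--
-- HEADER_PREFIXES = ("Title:", "Course:", "Module:", "Duration:")
--
--
-- def _extract_headered_json(text: str) -> dict:
--     # One streaming pass: a current-section name and a line buffer replace
--     # A's separate prefix pass and index-collection-then-slice section pass.
--     result = {k: "" for k in HEADER_PREFIXES}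
--     result.update({k: "" for k in SECTION_HEADERS})
--     current = None
--     buffer = []
--
--     def flush():
--         if current is not None:
--             result[current] = "\n".join(buffer).strip()
--
--     for ln in text.splitlines():
--         s = ln.strip()
--         for pref in HEADER_PREFIXES:
--             if s.startswith(pref):
--                 val = s[len(pref):].strip()
--                 if val.startswith(":"):
--                     val = val[1:].strip()
--                 result[pref] = val
--                 break
--         if s in SECTION_HEADERS:
--             flush()
--             current, buffer = s, []
--         elif current is not None:
--             buffer.append(ln)
--     flush()
--     return result
-- ===== Notes on version B (the rewrite author's own statement) =====
-- stated objective: simpler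
-- what changed: Replaces A's three passes (prefix scan, header-index collection, then slice/trim per index pair) with one streaming pass that keeps a current-section name and a line buffer, flushing a section by join-then-strip (which subsumes A's blank-line trimming).
import Mathlib
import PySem

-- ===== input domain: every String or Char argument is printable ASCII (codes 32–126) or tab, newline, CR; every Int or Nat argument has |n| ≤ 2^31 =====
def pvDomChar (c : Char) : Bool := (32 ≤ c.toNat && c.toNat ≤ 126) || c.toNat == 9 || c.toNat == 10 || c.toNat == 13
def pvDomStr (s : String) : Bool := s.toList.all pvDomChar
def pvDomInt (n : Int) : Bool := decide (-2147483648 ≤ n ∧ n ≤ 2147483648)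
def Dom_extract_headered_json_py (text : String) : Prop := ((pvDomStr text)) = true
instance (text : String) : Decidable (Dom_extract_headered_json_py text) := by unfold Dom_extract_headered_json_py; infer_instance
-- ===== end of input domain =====

-- B replaces A's three passes (prefix scan, header-index collection, slice/trim per
-- index pair) by ONE streaming pass with a current-section name and a line buffer
-- (objective: simpler).  Python's SECTION_HEADERS is a set whose iteration order is
-- unspecified; the output dict is compared ignoring order, so both ports fix the
-- source order of the set literal.

-- ===== PORT A =====
def pvPrefixes : List String := ["Title:", "Course:", "Module:", "Duration:"]

def pvSections : List String :=
  ["Learning Outcomes:", "Case Overview:", "Context & Timeline:", "Data Exhibits:",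
   "Guiding Questions (Before Analysis):", "Analysis Walkthrough:", "Decision Points:",
   "Instructor Notes (Model Answers):", "Wrap-Up & Transfer:", "Reflection Prompt:"]

def pvSecSet : PySem.Set String := PySem.Set.ofList pvSections

-- result = {k: "" for k in prefixes}; result.update({k: "" for k in sections})
def pvInit : PySem.Dict String String :=
  pvSections.foldl (fun d k => d.insert k "")
    (pvPrefixes.foldl (fun d k => d.insert k "") PySem.Dict.empty)

-- the inner 'for pref in prefixes: if s.startswith(pref): …; break' (identical in A and B)
def pvPrefLoop (d : PySem.Dict String String) (s : String) :
    List String → PySem.Dict String String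
  | [] => d
  | pref :: rest =>
    if PySem.Str.startswith s pref then
      let val := PySem.Str.strip (PySem.Str.slice s (some (PySem.Str.len pref)) none)
      let val := if PySem.Str.startswith val ":" then
                   PySem.Str.strip (PySem.Str.slice val (some 1) none)
                 else val
      d.insert pref val
    else pvPrefLoop d s rest

-- exact port of str.rstrip("\n") (strip only '\n' characters from the right)
def pvRstripNL (cs : List Char) : List Char := (cs.reverse.dropWhile (· == '\n')).reverse

-- while block and not block[0].strip(): block = block[1:]
def pvTrimFront : List String → List String
  | [] => []
  | ln :: rest => if PySem.Str.strip ln = "" then pvTrimFront rest else ln :: rest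

-- while block and not block[-1].strip(): block = block[:-1]
def pvTrimBack (b : List String) : List String :=
  match hb : b.getLast? with
  | none => b
  | some ln => if PySem.Str.strip ln = "" then pvTrimBack b.dropLast else b
termination_by b.length
decreasing_by
  have : b ≠ [] := by intro h; subst h; simp at hb
  have := List.length_pos_iff.mpr this
  simp [List.length_dropLast]; omega

def extract_headered_json_py (text : String) : List (String × String) :=
  let lines := (PySem.Str.splitlines text).map (fun ln => String.ofList (pvRstripNL ln.toList))
  -- prefix pass
  let d := lines.foldl (fun d ln => pvPrefLoop d (PySem.Str.strip ln) pvPrefixes) pvInit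
  -- index collection
  let indices := (PySem.List.enumerate lines).foldl
    (fun acc p =>
      if PySem.Set.contains pvSecSet (PySem.Str.strip p.2) then
        acc ++ [(p.1, PySem.Str.strip p.2)]
      else acc)
    ([] : List (Int × String))
  -- section blocks
  let d := (PySem.List.enumerate indices).foldl
    (fun d q =>
      let end_idx : Int :=
        if q.1 + 1 < (indices.length : Int) then (PySem.List.pyGetD indices (q.1 + 1) (0, "")).1
        else (lines.length : Int)
      let block := PySem.List.slice lines (some (q.2.1 + 1)) (some end_idx)
      let block := pvTrimFront block
      let block := pvTrimBack block
      d.insert q.2.2 (PySem.Str.strip (PySem.Str.join "\n" block)))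
    d
  d.items

-- ===== PORT B =====
def pvFlush (buf : List String) : String := PySem.Str.strip (PySem.Str.join "\n" buf)

-- 'def flush(): if current is not None: result[current] = "\n".join(buffer).strip()'
def pvFinal (d : PySem.Dict String String) (cur : Option String) (buf : List String) :
    PySem.Dict String String :=
  match cur with
  | some h => d.insert h (pvFlush buf)
  | none => d

def pvBStep (st : PySem.Dict String String × Option String × List String) (ln : String) :
    PySem.Dict String String × Option String × List String :=
  let s := PySem.Str.strip ln
  let d := pvPrefLoop st.1 s pvPrefixes
  if PySem.Set.contains pvSecSet s then (pvFinal d st.2.1 st.2.2, some s, ([] : List String))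
  else
    match st.2.1 with
    | some _ => (d, st.2.1, st.2.2 ++ [ln])
    | none => (d, st.2.1, st.2.2)

def extract_headered_json_py_alt (text : String) : List (String × String) :=
  let st := (PySem.Str.splitlines text).foldl pvBStep (pvInit, none, ([] : List String))
  (pvFinal st.1 st.2.1 st.2.2).items

-- ===== PRECONDITION & SPEC =====
def Spec_extract_headered_json_py (text : String) (out : List (String × String)) : Prop := out = extract_headered_json_py_alt text
instance (text : String) (out : List (String × String)) : Decidable (Spec_extract_headered_json_py text out) := by unfold Spec_extract_headered_json_py; infer_instance

-- ===== CLAIM (what is proved, stated in full; the proofs are below) =====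
def Claim_equal_extract_headered_json_py : Prop := ∀ (text : String), Dom_extract_headered_json_py text → Spec_extract_headered_json_py text (extract_headered_json_py text)

-- ===== LEMMAS AND PROOFS =====

-- abbreviations used only by the proofs
def pvIsHdr (ln : String) : Bool := PySem.Set.contains pvSecSet (PySem.Str.strip ln)

def pvPrefFold (ls : List String) (d : PySem.Dict String String) : PySem.Dict String String :=
  ls.foldl (fun d ln => pvPrefLoop d (PySem.Str.strip ln) pvPrefixes) d

def pvValA (b : List String) : String :=
  PySem.Str.strip (PySem.Str.join "\n" (pvTrimBack (pvTrimFront b)))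

-- section segments as A computes them: for every header line, the following lines
-- up to (excluding) the next header line
def pvBlocks : List String → List (String × List String)
  | [] => []
  | ln :: ls =>
    if pvIsHdr ln then
      (PySem.Str.strip ln, ls.takeWhile (fun l => !pvIsHdr l)) :: pvBlocks ls
    else pvBlocks ls

-- section segments as B streams them
def pvSegs : Option String → List String → List String → List (String × List String)
  | cur, buf, [] => (match cur with | none => [] | some h => [(h, buf)])
  | cur, buf, ln :: ls =>
    if pvIsHdr ln then
      (match cur with
       | none => pvSegs (some (PySem.Str.strip ln)) [] ls
       | some h => (h, buf) :: pvSegs (some (PySem.Str.strip ln)) [] ls)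
    else
      (match cur with
       | some h => pvSegs (some h) (buf ++ [ln]) ls
       | none => pvSegs none buf ls)

def pvInsFlush (d : PySem.Dict String String) (hb : String × List String) : PySem.Dict String String :=
  d.insert hb.1 (pvFlush hb.2)

def pvInsValA (d : PySem.Dict String String) (hb : String × List String) : PySem.Dict String String :=
  d.insert hb.1 (pvValA hb.2)

def pvInv (d : PySem.Dict String String) : Prop :=
  ∀ p ∈ pvPrefixes, d.contains p = true

-- index list as A collects it
def pvIdx : List String → Nat → List (Int × String)
  | [], _ => []
  | ln :: ls, k =>
    if pvIsHdr ln then ((k : Int), PySem.Str.strip ln) :: pvIdx ls (k + 1)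
    else pvIdx ls (k + 1)

-- each index paired with the start of the next block (lines.length for the last)
def pvPairs (L : Int) : List (Int × String) → List ((Int × String) × Int)
  | [] => []
  | p :: [] => [(p, L)]
  | p :: q :: rest => (p, q.1) :: pvPairs L (q :: rest)

-- ---- dict commutation ----

theorem pvInsert_comm (d : PySem.Dict String String) (h p : String) (v w : String)
    (hne : h ≠ p) (hc : d.contains p = true) :
    (d.insert h v).insert p w = (d.insert p w).insert h v := by
  apply PySem.Dict.ext
  by_cases ch : d.contains h = true
  · have hc1 : (d.insert h v).contains p = true := by
      rw [PySem.Dict.contains_insert]; simp [hc]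
    have hc2 : (d.insert p w).contains h = true := by
      rw [PySem.Dict.contains_insert]; simp [ch]
    rw [PySem.Dict.items_insert_of_contains _ _ hc1,
        PySem.Dict.items_insert_of_contains _ _ ch,
        PySem.Dict.items_insert_of_contains _ _ hc2,
        PySem.Dict.items_insert_of_contains _ _ hc]
    simp only [List.map_map]
    apply List.map_congr_left
    intro x _
    by_cases hx : x.1 = h
    · simp [hx, hne]
    · by_cases hx2 : x.1 = p
      · simp [hx2, Ne.symm hne]
      · simp [hx, hx2]
  · have ch' : d.contains h = false := by simpa using ch
    have hc1 : (d.insert h v).contains p = true := by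
      rw [PySem.Dict.contains_insert]; simp [hc]
    have hc2 : (d.insert p w).contains h = false := by
      rw [PySem.Dict.contains_insert]; simp [ch', hne]
    rw [PySem.Dict.items_insert_of_contains _ _ hc1,
        PySem.Dict.items_insert_of_not_contains _ _ ch',
        PySem.Dict.items_insert_of_not_contains _ _ hc2,
        PySem.Dict.items_insert_of_contains _ _ hc]
    simp [hne]

theorem pvPrefLoop_insert (d : PySem.Dict String String) (s h v : String)
    (prefs : List String) (hp : ∀ p ∈ prefs, p ≠ h ∧ d.contains p = true) :
    pvPrefLoop (d.insert h v) s prefs = (pvPrefLoop d s prefs).insert h v := by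
  induction prefs with
  | nil => rfl
  | cons pref rest ih =>
    have h1 := hp pref (by simp)
    simp only [pvPrefLoop]
    split
    · exact pvInsert_comm d h pref v _ (Ne.symm h1.1) h1.2
    · exact ih (fun p hp' => hp p (by simp [hp']))

theorem pvInv_insert (d : PySem.Dict String String) (k v : String) (hd : pvInv d) :
    pvInv (d.insert k v) := by
  intro p hp
  rw [PySem.Dict.contains_insert]
  simp [hd p hp]

theorem pvInv_prefLoop (d : PySem.Dict String String) (s : String) (prefs : List String)
    (hd : pvInv d) : pvInv (pvPrefLoop d s prefs) := by
  induction prefs with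
  | nil => exact hd
  | cons pref rest ih =>
    simp only [pvPrefLoop]
    split
    · exact pvInv_insert _ _ _ hd
    · exact ih

theorem pvInv_init : pvInv pvInit := by
  intro p hp
  fin_cases hp <;> decide

theorem pvPrefFold_insert (ls : List String) (d : PySem.Dict String String) (h v : String)
    (hd : pvInv d) (hh : h ∉ pvPrefixes) :
    pvPrefFold ls (d.insert h v) = (pvPrefFold ls d).insert h v := by
  induction ls generalizing d with
  | nil => rfl
  | cons ln ls ih =>
    simp only [pvPrefFold, List.foldl_cons]
    rw [pvPrefLoop_insert d _ h v pvPrefixes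
      (fun p hp => ⟨fun he => hh (he ▸ hp), hd p hp⟩)]
    exact ih _ (pvInv_prefLoop d _ _ hd)

theorem pvHdr_not_prefix (ln : String) (h : pvIsHdr ln = true) :
    PySem.Str.strip ln ∉ pvPrefixes := by
  have hmem : PySem.Str.strip ln ∈ pvSections := by
    have := (PySem.Set.contains_iff (s := pvSecSet) (x := PySem.Str.strip ln)).mp h
    simpa [pvSecSet, PySem.Set.mem_ofList] using this
  have hdisj : ∀ x ∈ pvSections, x ∉ pvPrefixes := by decide
  exact hdisj _ hmem

-- ---- B characterization ----

theorem pvBGen (ls : List String) (d : PySem.Dict String String) (cur : Option String)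
    (buf : List String) (hd : pvInv d)
    (hcur : ∀ h, cur = some h → h ∉ pvPrefixes) :
    (fun st => pvFinal st.1 st.2.1 st.2.2) (ls.foldl pvBStep (d, cur, buf)) =
      (pvSegs cur buf ls).foldl pvInsFlush (pvPrefFold ls d) := by
  induction ls generalizing d cur buf with
  | nil =>
    cases cur with
    | none => rfl
    | some h => rfl
  | cons ln ls ih =>
    have hd1 : pvInv (pvPrefLoop d (PySem.Str.strip ln) pvPrefixes) := pvInv_prefLoop d _ _ hd
    have hfold : pvPrefFold (ln :: ls) d =
        pvPrefFold ls (pvPrefLoop d (PySem.Str.strip ln) pvPrefixes) := rfl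
    by_cases hh : pvIsHdr ln = true
    · have hs : PySem.Str.strip ln ∉ pvPrefixes := pvHdr_not_prefix ln hh
      have hc : PySem.Set.contains pvSecSet (PySem.Str.strip ln) = true := hh
      cases cur with
      | none =>
        have hstep : pvBStep (d, none, buf) ln =
            (pvPrefLoop d (PySem.Str.strip ln) pvPrefixes, some (PySem.Str.strip ln),
             ([] : List String)) := by
          simp only [pvBStep]; rw [hc]; simp [pvFinal]
        rw [List.foldl_cons, hstep,
          ih _ _ _ hd1 (fun h' he => by injection he with he'; exact he' ▸ hs)]
        rw [hfold]
        simp only [pvSegs, hh, if_pos]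
      | some h =>
        have hnp : h ∉ pvPrefixes := hcur h rfl
        have hstep : pvBStep (d, some h, buf) ln =
            ((pvPrefLoop d (PySem.Str.strip ln) pvPrefixes).insert h (pvFlush buf),
             some (PySem.Str.strip ln), ([] : List String)) := by
          simp only [pvBStep]; rw [hc]; simp [pvFinal]
        rw [List.foldl_cons, hstep,
          ih _ _ _ (pvInv_insert _ _ _ hd1) (fun h' he => by injection he with he'; exact he' ▸ hs)]
        rw [pvPrefFold_insert ls _ h _ hd1 hnp]
        rw [hfold]
        simp only [pvSegs, hh, if_pos, List.foldl_cons]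
        rfl
    · have hh' : pvIsHdr ln = false := by simpa using hh
      have hc : PySem.Set.contains pvSecSet (PySem.Str.strip ln) = false := hh'
      cases cur with
      | none =>
        have hstep : pvBStep (d, none, buf) ln =
            (pvPrefLoop d (PySem.Str.strip ln) pvPrefixes, none, buf) := by
          simp only [pvBStep]; rw [hc]; simp
        rw [List.foldl_cons, hstep, ih _ _ _ hd1 (by simp)]
        rw [hfold]
        simp only [pvSegs, hh', Bool.false_eq_true]
        rfl
      | some h =>
        have hstep : pvBStep (d, some h, buf) ln =
            (pvPrefLoop d (PySem.Str.strip ln) pvPrefixes, some h, buf ++ [ln]) := by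
          simp only [pvBStep]; rw [hc]; simp
        rw [List.foldl_cons, hstep, ih _ _ _ hd1 hcur]
        rw [hfold]
        simp only [pvSegs, hh', Bool.false_eq_true]
        rfl

-- ---- segments: streaming = per-header ----

theorem pvSegs_some (ls : List String) (h : String) (buf : List String) :
    pvSegs (some h) buf ls =
      (h, buf ++ ls.takeWhile (fun l => !pvIsHdr l)) :: pvBlocks ls := by
  induction ls generalizing h buf with
  | nil => simp [pvSegs, pvBlocks]
  | cons ln ls ih =>
    by_cases hh : pvIsHdr ln = true
    · simp [pvSegs, pvBlocks, hh, ih]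
    · have hh' : pvIsHdr ln = false := by simpa using hh
      simp [pvSegs, pvBlocks, hh', ih]

theorem pvSegs_none (ls : List String) (buf : List String) :
    pvSegs none buf ls = pvBlocks ls := by
  induction ls generalizing buf with
  | nil => rfl
  | cons ln ls ih =>
    by_cases hh : pvIsHdr ln = true
    · simp [pvSegs, pvBlocks, hh, pvSegs_some]
    · have hh' : pvIsHdr ln = false := by simpa using hh
      simp [pvSegs, pvBlocks, hh', ih]

-- ---- A characterization ----

theorem pvIdx_spec (ls : List String) (k : Nat) (acc : List (Int × String)) :
    (PySem.List.enumerate ls (k : Int)).foldl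
      (fun acc p =>
        if PySem.Set.contains pvSecSet (PySem.Str.strip p.2) then
          acc ++ [(p.1, PySem.Str.strip p.2)]
        else acc) acc = acc ++ pvIdx ls k := by
  induction ls generalizing k acc with
  | nil => simp [pvIdx, PySem.List.enumerate]
  | cons ln ls ih =>
    rw [PySem.List.enumerate_cons, List.foldl_cons]
    have hcast : (k : Int) + 1 = ((k + 1 : Nat) : Int) := by push_cast; ring
    rw [hcast, ih (k + 1)]
    simp only [pvIdx, pvIsHdr]
    by_cases hh : PySem.Set.contains pvSecSet (PySem.Str.strip ln) = true
    · simp only [hh, if_pos]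
      simp
    · have hh' : PySem.Set.contains pvSecSet (PySem.Str.strip ln) = false := by simpa using hh
      simp only [hh', Bool.false_eq_true]
      simp

theorem pvPairs_spec (idxs : List (Int × String)) (lines : List String)
    (rest : List (Int × String)) (j : Nat) (d : PySem.Dict String String)
    (hdrop : idxs.drop j = rest) :
    (PySem.List.enumerate rest (j : Int)).foldl
      (fun d q =>
        let end_idx : Int :=
          if q.1 + 1 < (idxs.length : Int) then (PySem.List.pyGetD idxs (q.1 + 1) (0, "")).1
          else (lines.length : Int)
        let block := PySem.List.slice lines (some (q.2.1 + 1)) (some end_idx)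
        let block := pvTrimFront block
        let block := pvTrimBack block
        d.insert q.2.2 (PySem.Str.strip (PySem.Str.join "\n" block))) d =
      (pvPairs (lines.length : Int) rest).foldl
        (fun d pe => d.insert pe.1.2 (pvValA (PySem.List.slice lines (some (pe.1.1 + 1)) (some pe.2)))) d := by
  have hfun : (fun (d : PySem.Dict String String) (q : Int × (Int × String)) =>
      let end_idx : Int :=
        if q.1 + 1 < (idxs.length : Int) then (PySem.List.pyGetD idxs (q.1 + 1) (0, "")).1
        else (lines.length : Int)
      let block := PySem.List.slice lines (some (q.2.1 + 1)) (some end_idx)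
      let block := pvTrimFront block
      let block := pvTrimBack block
      d.insert q.2.2 (PySem.Str.strip (PySem.Str.join "\n" block))) =
      (fun (d : PySem.Dict String String) (q : Int × (Int × String)) =>
        d.insert q.2.2 (pvValA (PySem.List.slice lines (some (q.2.1 + 1))
          (some (if q.1 + 1 < (idxs.length : Int) then (PySem.List.pyGetD idxs (q.1 + 1) (0, "")).1
                 else (lines.length : Int)))))) := rfl
  rw [hfun]
  clear hfun
  induction rest generalizing j d with
  | nil => simp [pvPairs, PySem.List.enumerate]
  | cons p rest ih =>
    have h1 : (idxs.drop j).length = rest.length + 1 := by rw [hdrop]; simp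
    have h2 : idxs.length - j = rest.length + 1 := by simpa using h1
    rw [PySem.List.enumerate_cons, List.foldl_cons]
    cases rest with
    | nil =>
      have hcond : ¬((j : Int) + 1 < (idxs.length : Int)) := by
        simp only [List.length_nil] at h2
        have : idxs.length = j + 1 := by omega
        rw [this]; omega
      simp only [hcond, pvPairs, List.foldl_cons, List.foldl_nil]
      have : PySem.List.enumerate ([] : List (Int × String)) ((j : Int) + 1) = [] := rfl
      rw [this]
      rfl
    | cons q rest' =>
      have hcond : (j : Int) + 1 < (idxs.length : Int) := by
        simp only [List.length_cons] at h2
        have : j + 2 ≤ idxs.length := by omega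
        omega
      have hd2 : idxs.drop (j + 1) = q :: rest' := by
        have := congrArg List.tail hdrop
        simpa [List.tail_drop] using this
      have hget : PySem.List.pyGetD idxs ((j : Int) + 1) (0, "") = q := by
        have hcast : (j : Int) + 1 = ((j + 1 : Nat) : Int) := by push_cast; ring
        rw [hcast, PySem.List.pyGetD_natCast]
        have hq : idxs[j + 1]? = some q := by
          have h0 : (idxs.drop (j + 1))[0]? = some q := by rw [hd2]; rfl
          rwa [List.getElem?_drop, Nat.add_zero] at h0
        simp [List.getD, hq]
      have hcast : (j : Int) + 1 = ((j + 1 : Nat) : Int) := by push_cast; ring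
      simp only [hcond, if_pos, hget, pvPairs, List.foldl_cons]
      rw [hcast, ih (j + 1) _ hd2]

theorem pvFirstHdr (ls : List String) (k : Nat) :
    (pvIdx ls k = [] ∧ ls.takeWhile (fun l => !pvIsHdr l) = ls ∧ pvBlocks ls = []) ∨
    (∃ j s' rest, pvIdx ls k = (((k + j : Nat) : Int), s') :: rest ∧
      ls.takeWhile (fun l => !pvIsHdr l) = ls.take j) := by
  induction ls generalizing k with
  | nil => exact Or.inl ⟨rfl, rfl, rfl⟩
  | cons ln ls ih =>
    by_cases hh : pvIsHdr ln = true
    · refine Or.inr ⟨0, PySem.Str.strip ln, pvIdx ls (k + 1), ?_, ?_⟩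
      · simp [pvIdx, hh]
      · simp [hh]
    · have hh' : pvIsHdr ln = false := by simpa using hh
      rcases ih (k + 1) with ⟨h1, h2, h3⟩ | ⟨j, s', rest, h1, h2⟩
      · exact Or.inl ⟨by simp [pvIdx, hh', h1], by simp [hh', h2], by simp [pvBlocks, hh', h3]⟩
      · refine Or.inr ⟨j + 1, s', rest, ?_, ?_⟩
        · rw [show pvIdx (ln :: ls) k = pvIdx ls (k + 1) by simp [pvIdx, hh'], h1]
          congr 2
          omega
        · simp [hh', h2]

theorem pvPairs_map (lines ls : List String) (k : Nat) (hdrop : lines.drop k = ls) :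
    (pvPairs (lines.length : Int) (pvIdx ls k)).map
        (fun pe => (pe.1.2, PySem.List.slice lines (some (pe.1.1 + 1)) (some pe.2))) =
      pvBlocks ls := by
  induction ls generalizing k with
  | nil => rfl
  | cons ln ls ih =>
    have hdrop' : lines.drop (k + 1) = ls := by
      have := congrArg List.tail hdrop
      simpa [List.tail_drop] using this
    by_cases hh : pvIsHdr ln = true
    · have hidx : pvIdx (ln :: ls) k = ((k : Int), PySem.Str.strip ln) :: pvIdx ls (k + 1) := by
        simp [pvIdx, hh]
      have hcast : (k : Int) + 1 = ((k + 1 : Nat) : Int) := by push_cast; ring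
      rcases pvFirstHdr ls (k + 1) with ⟨h1, h2, h3⟩ | ⟨j, s', rest, h1, h2⟩
      · rw [hidx, h1]
        simp only [pvPairs, List.map_cons, List.map_nil]
        have hslice : PySem.List.slice lines (some ((k : Int) + 1)) (some (lines.length : Int)) = ls := by
          rw [hcast, PySem.List.slice_natCast, ← hdrop']
          exact List.take_of_length_le (by simp)
        rw [hslice]
        simp [pvBlocks, hh, h2, h3]
      · rw [hidx, h1]
        simp only [pvPairs, List.map_cons]
        have hslice : PySem.List.slice lines (some ((k : Int) + 1)) (some (((k + 1 + j : Nat)) : Int)) =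
            ls.take j := by
          rw [hcast, PySem.List.slice_natCast, hdrop']
          congr 1
          omega
        rw [hslice, ← h1, ih (k + 1) hdrop']
        simp [pvBlocks, hh, h2]
    · have hh' : pvIsHdr ln = false := by simpa using hh
      rw [show pvIdx (ln :: ls) k = pvIdx ls (k + 1) by simp [pvIdx, hh'], ih (k + 1) hdrop']
      simp [pvBlocks, hh']

-- ---- values: trim+join+strip = join+strip ----

theorem pvAllspace_of_blank (ln : String) (h : PySem.Str.strip ln = "") :
    ∀ c ∈ ln.toList, PySem.Chars.isspace c = true := by
  have h0 : PySem.Chars.strip ln.toList = [] := by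
    rw [← PySem.Str.toList_strip, h]; rfl
  have h1 : ∀ c ∈ PySem.Chars.lstrip ln.toList, PySem.Chars.isspace c = true := by
    intro c hc
    have h2 : List.dropWhile PySem.Chars.isspace (PySem.Chars.lstrip ln.toList).reverse = [] := by
      have := congrArg List.reverse h0
      simpa [PySem.Chars.strip, PySem.Chars.rstrip] using this
    exact List.dropWhile_eq_nil_iff.mp h2 c (by simpa using hc)
  intro c hc
  rw [← List.takeWhile_append_dropWhile (p := PySem.Chars.isspace) (l := ln.toList)] at hc
  rcases List.mem_append.mp hc with hc | hc
  · exact List.mem_takeWhile_imp hc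
  · exact h1 c hc

theorem pvStrip_ws_append (ws x : List Char)
    (hws : ∀ c ∈ ws, PySem.Chars.isspace c = true) :
    PySem.Chars.strip (ws ++ x) = PySem.Chars.strip x := by
  have hd : List.dropWhile PySem.Chars.isspace ws = [] := List.dropWhile_eq_nil_iff.mpr hws
  simp only [PySem.Chars.strip, PySem.Chars.lstrip, List.dropWhile_append, hd]
  simp

theorem pvStrip_append_ws (x ws : List Char)
    (hws : ∀ c ∈ ws, PySem.Chars.isspace c = true) :
    PySem.Chars.strip (x ++ ws) = PySem.Chars.strip x := by
  have hd : List.dropWhile PySem.Chars.isspace ws = [] := List.dropWhile_eq_nil_iff.mpr hws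
  have hdr : List.dropWhile PySem.Chars.isspace ws.reverse = [] :=
    List.dropWhile_eq_nil_iff.mpr (by simpa using hws)
  simp only [PySem.Chars.strip, PySem.Chars.lstrip, List.dropWhile_append, hd]
  by_cases he : (List.dropWhile PySem.Chars.isspace x).isEmpty = true
  · simp only [he, if_pos]
    simp only [List.isEmpty_iff] at he
    simp [he, PySem.Chars.rstrip]
  · simp only [he, if_neg, Bool.false_eq_true, not_false_iff]
    simp only [PySem.Chars.rstrip, List.reverse_append, List.dropWhile_append, hdr]
    simp

theorem pvJoin_append_singleton (sep : List Char) (xs : List (List Char)) (l : List Char) :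
    PySem.Chars.join sep (xs ++ [l]) =
      if xs = [] then l else PySem.Chars.join sep xs ++ sep ++ l := by
  induction xs with
  | nil => simp [PySem.Chars.join_singleton]
  | cons a xs ih =>
    cases xs with
    | nil => simp [PySem.Chars.join_cons_cons, PySem.Chars.join_singleton]
    | cons b xs' =>
      rw [if_neg (by simp : ¬(a :: b :: xs' = []))]
      rw [if_neg (by simp : ¬(b :: xs' = []))] at ih
      simp only [List.cons_append] at ih ⊢
      rw [PySem.Chars.join_cons_cons, ih, PySem.Chars.join_cons_cons]
      simp [List.append_assoc]

theorem pvNlSpace : ∀ c ∈ "\n".toList, PySem.Chars.isspace c = true := by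
  intro c hc
  rw [show "\n".toList = ['\n'] from rfl] at hc
  simp only [List.mem_singleton] at hc
  subst hc
  decide

theorem pvStripJoin_front (b : List String) :
    PySem.Chars.strip (PySem.Chars.join "\n".toList ((pvTrimFront b).map String.toList)) =
      PySem.Chars.strip (PySem.Chars.join "\n".toList (b.map String.toList)) := by
  induction b with
  | nil => rfl
  | cons ln rest ih =>
    by_cases hb : PySem.Str.strip ln = ""
    · have hws := pvAllspace_of_blank ln hb
      rw [show pvTrimFront (ln :: rest) = pvTrimFront rest by simp [pvTrimFront, hb], ih]
      cases rest with
      | nil =>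
        simp only [List.map_nil, PySem.Chars.join_nil, List.map_cons, PySem.Chars.join_singleton]
        have h0 : PySem.Chars.strip ln.toList = [] := by
          rw [← PySem.Str.toList_strip, hb]; rfl
        simp [PySem.Chars.strip, PySem.Chars.lstrip, PySem.Chars.rstrip] at h0 ⊢
        exact h0
      | cons m rest' =>
        simp only [List.map_cons, PySem.Chars.join_cons_cons]
        exact (pvStrip_ws_append _ _ (by
          intro c hc
          rcases List.mem_append.mp hc with hc | hc
          · exact hws c hc
          · exact pvNlSpace c hc)).symm
    · rw [show pvTrimFront (ln :: rest) = ln :: rest by simp [pvTrimFront, hb]]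

theorem pvStripJoin_back_rev (r : List String) :
    PySem.Chars.strip (PySem.Chars.join "\n".toList ((pvTrimBack r.reverse).map String.toList)) =
      PySem.Chars.strip (PySem.Chars.join "\n".toList (r.reverse.map String.toList)) := by
  cases r with
  | nil =>
    rw [List.reverse_nil, pvTrimBack]
    rfl
  | cons ln r' =>
    rw [List.reverse_cons, pvTrimBack]
    split
    · rename_i hnone
      simp at hnone
    · rename_i ln2 hsome
      have hln : ln = ln2 := by simpa [List.getLast?_concat] using hsome
      subst hln
      split
      · rename_i hblank
        have hws := pvAllspace_of_blank ln hblank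
        rw [List.dropLast_concat]
        rw [pvStripJoin_back_rev r']
        simp only [List.map_append, List.map_cons, List.map_nil]
        rw [pvJoin_append_singleton]
        cases hinit : r'.reverse.map String.toList with
        | nil =>
          rw [if_pos rfl]
          have h0 : PySem.Chars.strip ln.toList = [] := by
            rw [← PySem.Str.toList_strip, hblank]; rfl
          rw [h0, PySem.Chars.join_nil]
          rfl
        | cons p ps =>
          rw [if_neg (by simp)]
          rw [List.append_assoc]
          exact (pvStrip_append_ws _ _ (by
            intro c hc
            rcases List.mem_append.mp hc with hc | hc
            · exact pvNlSpace c hc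
            · exact hws c hc)).symm
      · rfl

theorem pvStripJoin_back (b : List String) :
    PySem.Chars.strip (PySem.Chars.join "\n".toList ((pvTrimBack b).map String.toList)) =
      PySem.Chars.strip (PySem.Chars.join "\n".toList (b.map String.toList)) := by
  have := pvStripJoin_back_rev b.reverse
  rwa [List.reverse_reverse] at this

theorem pvValA_eq_flush (b : List String) : pvValA b = pvFlush b := by
  unfold pvValA pvFlush
  have h1 : ∀ (x : List String), PySem.Str.strip (PySem.Str.join "\n" x) =
      String.ofList (PySem.Chars.strip (PySem.Chars.join "\n".toList (x.map String.toList))) := by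
    intro x
    rw [PySem.Str.strip, PySem.Str.toList_join]
  rw [h1, h1]
  rw [pvStripJoin_back, pvStripJoin_front]

-- ---- splitlines lines contain no newline ----

def pvIsB (c : Char) : Bool :=
  let n := c.toNat
  decide (n = 10) || decide (n = 13) || decide (n = 11) || decide (n = 12) || decide (n = 28) ||
    decide (n = 29) || decide (n = 30) || decide (n = 133) || decide (n = 8232) || decide (n = 8233)

theorem pvGo_flat :
    ∀ (n : Nat) (s cur : List Char) (acc : List (List Char)),
      s.length ≤ n →
      (∀ c ∈ cur, pvIsB c = false) →
      (∀ l ∈ acc, ∀ c ∈ l, pvIsB c = false) →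
      ∀ l ∈ PySem.Chars.splitlines.go pvIsB s cur acc, ∀ c ∈ l, pvIsB c = false := by
  intro n
  induction n with
  | zero =>
    intro s cur acc hlen hcur hacc
    have hs : s = [] := List.eq_nil_of_length_eq_zero (Nat.le_zero.mp hlen)
    subst hs
    rw [PySem.Chars.splitlines.go.eq_1]
    split
    · intro l hl
      exact hacc l (by simpa using hl)
    · intro l hl
      rw [List.mem_reverse] at hl
      rcases List.mem_cons.mp hl with rfl | hl
      · intro c hc
        exact hcur c (List.mem_reverse.mp hc)
      · exact hacc l hl
  | succ n ih =>
    intro s cur acc hlen hcur hacc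
    have hend : ∀ (cur : List Char) (acc : List (List Char)),
        (∀ c ∈ cur, pvIsB c = false) →
        (∀ l ∈ acc, ∀ c ∈ l, pvIsB c = false) →
        ∀ l ∈ PySem.Chars.splitlines.go pvIsB [] cur acc, ∀ c ∈ l, pvIsB c = false := by
      intro cur acc hcur hacc
      rw [PySem.Chars.splitlines.go.eq_1]
      split
      · intro l hl
        exact hacc l (by simpa using hl)
      · intro l hl
        rw [List.mem_reverse] at hl
        rcases List.mem_cons.mp hl with rfl | hl
        · intro c hc
          exact hcur c (List.mem_reverse.mp hc)
        · exact hacc l hl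
    have hnewacc : ∀ l ∈ cur.reverse :: acc, ∀ c ∈ l, pvIsB c = false := by
      intro l hl
      rcases List.mem_cons.mp hl with hl | hl
      · intro c hc
        exact hcur c (by simpa [hl] using hc)
      · exact hacc l hl
    cases s with
    | nil => exact hend cur acc hcur hacc
    | cons c rest =>
      cases rest with
      | nil =>
        rw [PySem.Chars.splitlines.go.eq_3 _ _ _ _ _ (by intro r1 _ hr; simp at hr)]
        by_cases hb : pvIsB c = true
        · simp only [hb, if_pos]
          exact ih [] [] (cur.reverse :: acc) (by simp) (by simp) hnewacc
        · have hb' : pvIsB c = false := by simpa using hb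
          simp only [hb', Bool.false_eq_true, if_neg, not_false_iff]
          refine ih [] (c :: cur) acc (by simp) ?_ hacc
          intro c' hc'
          rcases List.mem_cons.mp hc' with hc' | hc'
          · exact hc' ▸ hb'
          · exact hcur c' hc'
      | cons c2 rest' =>
        by_cases hcr : c = '\x0d' ∧ c2 = '\n'
        · obtain ⟨rfl, rfl⟩ := hcr
          rw [PySem.Chars.splitlines.go.eq_2]
          exact ih rest' [] (cur.reverse :: acc) (by simp at hlen ⊢; omega) (by simp) hnewacc
        · rw [PySem.Chars.splitlines.go.eq_3 _ _ _ _ _ (by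
            intro r1 hc hr
            injection hr with h1 _
            exact hcr ⟨hc, h1⟩)]
          by_cases hb : pvIsB c = true
          · simp only [hb, if_pos]
            exact ih (c2 :: rest') [] (cur.reverse :: acc) (by simp at hlen ⊢; omega) (by simp) hnewacc
          · have hb' : pvIsB c = false := by simpa using hb
            simp only [hb', Bool.false_eq_true, if_neg, not_false_iff]
            refine ih (c2 :: rest') (c :: cur) acc (by simp at hlen ⊢; omega) ?_ hacc
            intro c' hc'
            rcases List.mem_cons.mp hc' with hc' | hc'
            · exact hc' ▸ hb'
            · exact hcur c' hc'

theorem pvSplitlines_flat (cs : List Char) :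
    ∀ l ∈ PySem.Chars.splitlines cs, ∀ c ∈ l, c ≠ '\n' := by
  have hrfl : PySem.Chars.splitlines cs = PySem.Chars.splitlines.go pvIsB cs [] [] := rfl
  intro l hl c hc
  have hflat := pvGo_flat cs.length cs [] [] le_rfl (by simp) (by simp) l (hrfl ▸ hl) c hc
  intro hceq
  subst hceq
  simp [pvIsB] at hflat

theorem pvSplitlines_no_nl (text : String) :
    (PySem.Str.splitlines text).map (fun ln => String.ofList (pvRstripNL ln.toList)) =
      PySem.Str.splitlines text := by
  have hsp : PySem.Str.splitlines text =
      (PySem.Chars.splitlines text.toList).map String.ofList := rfl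
  rw [hsp, List.map_map]
  apply List.map_congr_left
  intro l hl
  have hno : ∀ c ∈ l, c ≠ '\n' := pvSplitlines_flat text.toList l hl
  have hid : pvRstripNL l = l := by
    unfold pvRstripNL
    cases hrev : l.reverse with
    | nil =>
      have : l = [] := by simpa using congrArg List.reverse hrev
      subst this
      rfl
    | cons c r =>
      have hcl : c ∈ l := by
        have : c ∈ l.reverse := by rw [hrev]; simp
        simpa using this
      have : (c == '\n') = false := by
        simp [hno c hcl]
      rw [List.dropWhile_cons, this]
      simp only [Bool.false_eq_true, if_neg, not_false_iff]
      rw [← hrev, List.reverse_reverse]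
  simp [String.toList_ofList, hid]

-- ---- main ----

theorem pvMain (text : String) :
    extract_headered_json_py text = extract_headered_json_py_alt text := by
  simp only [extract_headered_json_py, extract_headered_json_py_alt]
  rw [pvSplitlines_no_nl]
  have hB := pvBGen (PySem.Str.splitlines text) pvInit none [] pvInv_init (by simp)
  simp only at hB
  rw [hB, pvSegs_none]
  have hI := pvIdx_spec (PySem.Str.splitlines text) 0 []
  rw [show ((0 : Nat) : Int) = (0 : Int) by norm_num] at hI
  rw [hI, List.nil_append]
  have hP := pvPairs_spec (pvIdx (PySem.Str.splitlines text) 0) (PySem.Str.splitlines text)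
    (pvIdx (PySem.Str.splitlines text) 0) 0
    (pvPrefFold (PySem.Str.splitlines text) pvInit) (by simp)
  rw [show ((0 : Nat) : Int) = (0 : Int) by norm_num] at hP
  rw [show (PySem.Str.splitlines text).foldl
        (fun d ln => pvPrefLoop d (PySem.Str.strip ln) pvPrefixes) pvInit =
      pvPrefFold (PySem.Str.splitlines text) pvInit from rfl]
  rw [hP]
  have hfold : ∀ (pl : List ((Int × String) × Int)) (d0 : PySem.Dict String String),
      pl.foldl (fun d pe => d.insert pe.1.2
        (pvValA (PySem.List.slice (PySem.Str.splitlines text) (some (pe.1.1 + 1)) (some pe.2)))) d0 =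
      (pl.map (fun pe => (pe.1.2,
        PySem.List.slice (PySem.Str.splitlines text) (some (pe.1.1 + 1)) (some pe.2)))).foldl
        pvInsValA d0 := by
    intro pl d0
    rw [List.foldl_map]
    rfl
  rw [hfold, pvPairs_map (PySem.Str.splitlines text) (PySem.Str.splitlines text) 0 rfl]
  have hIF : pvInsValA = pvInsFlush := by
    funext d hb
    unfold pvInsValA pvInsFlush
    rw [pvValA_eq_flush]
  rw [hIF]

-- ===== VERDICT (by name: the statement is the Claim_ definition above) =====
theorem extract_headered_json_py_spec : Claim_equal_extract_headered_json_py := by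
  intro text _
  unfold Spec_extract_headered_json_py
  exact pvMain text
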